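-- pv_equiv track=rewrite | github.com/Adarshb2000/coding | ALTARAY.py | altaray
-- ===== SOURCE A (Python) =====
-- def altaray(numbers):
--     n = len(numbers)
--
--     answer = [1] * n
--     temp = [None] * (n - 1)
--
--     for i in range(n - 1):
--         temp[i] = numbers[i] * numbers[i + 1] < 0
--
--     for i, change in enumerate(reversed(temp), start=2):
--         if change:
--             answer[-i] = answer[-i + 1] + 1
--
--     return answer
-- ===== SOURCE B (Python) =====
-- def altaray(numbers):
--     n = len(numbers)
--     answer = []
--     i = 0
--     while i < n:
--         j = i
--         while j + 1 < n and numbers[j] * numbers[j + 1] < 0: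
--             j += 1
--         answer.extend(j - k + 1 for k in range(i, j + 1))
--         i = j + 1
--     return answer
-- ===== Notes on version B (the rewrite author's own statement) =====
-- stated objective: alternative
-- what changed: A builds a boolean sign-change array and then walks it in reverse with negative-index in-place updates (answer[-i] = answer[-i+1]+1); B makes one forward pass that finds each maximal alternating run [i,j] and emits the countdown block j-k+1 for that run directly, with no temp array and no in-place updates.
import Mathlib
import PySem

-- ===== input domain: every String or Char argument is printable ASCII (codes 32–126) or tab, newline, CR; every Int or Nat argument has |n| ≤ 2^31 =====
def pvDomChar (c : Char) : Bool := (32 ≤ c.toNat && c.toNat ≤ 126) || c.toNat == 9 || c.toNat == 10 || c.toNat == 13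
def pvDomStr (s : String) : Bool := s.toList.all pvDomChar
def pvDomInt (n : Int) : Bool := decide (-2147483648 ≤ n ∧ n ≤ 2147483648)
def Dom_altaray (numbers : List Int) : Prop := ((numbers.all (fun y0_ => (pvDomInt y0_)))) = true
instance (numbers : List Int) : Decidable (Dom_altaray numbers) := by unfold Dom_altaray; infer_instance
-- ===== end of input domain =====

-- B replaces A's temp array + reverse negative-index update pass by one forward pass over maximal
-- alternating runs; alternative decomposition, same O(n) cost.

-- ===== PORT A =====
-- for i, change in enumerate(reversed(temp), start=2): if change: answer[-i] = answer[-i+1] + 1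
-- (negative Python indices -i, -i+1 are always in range here, so they denote len - i and len - i + 1;
--  getD/set at those in-range positions are exact)
def altarayLoop2 (ans : List Int) (rev : List Bool) (i : Nat) : List Int :=
  match rev with
  | [] => ans
  | change :: rest =>
      let ans' := if change then ans.set (ans.length - i) ((ans.getD (ans.length - i + 1) 0) + 1)
                  else ans
      altarayLoop2 ans' rest (i + 1)

def altaray (numbers : List Int) : List Int :=
  let n := numbers.length
  let answer := List.replicate n (1 : Int)
  -- for i in range(n-1): temp[i] = numbers[i] * numbers[i+1] < 0   (indices are in range, getD exact)
  let temp := (List.range (n - 1)).map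
    (fun i => decide (numbers.getD i 0 * numbers.getD (i + 1) 0 < 0))
  altarayLoop2 answer temp.reverse 2

-- ===== PORT B =====
-- inner while: extend j while j+1 < n and numbers[j]*numbers[j+1] < 0 (indices in range, getD exact)
def altarayFind (numbers : List Int) (n j : Nat) : Nat :=
  if h : j + 1 < n ∧ numbers.getD j 0 * numbers.getD (j + 1) 0 < 0
  then altarayFind numbers n (j + 1) else j
termination_by n - j
decreasing_by omega

-- outer while i < n, fuel = n bounds its iteration count (i strictly increases each pass)
def altarayOuter (numbers : List Int) (n i : Nat) (fuel : Nat) : List Int :=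
  match fuel with
  | 0 => []
  | fuel + 1 =>
    if i < n then
      let j := altarayFind numbers n i
      (PySem.List.pyRange (i : Int) ((j : Int) + 1) 1).map (fun k => (j : Int) - k + 1)
        ++ altarayOuter numbers n (j + 1) fuel
    else []

def altaray_alt (numbers : List Int) : List Int :=
  altarayOuter numbers numbers.length 0 numbers.length

-- ===== PRECONDITION & SPEC =====
def Spec_altaray (numbers : List Int) (out : List Int) : Prop := out = altaray_alt numbers
instance (numbers : List Int) (out : List Int) : Decidable (Spec_altaray numbers out) := by unfold Spec_altaray; infer_instance

-- ===== CLAIM (what is proved, stated in full; the proofs are below) =====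
def Claim_equal_altaray : Prop := ∀ (numbers : List Int), Dom_altaray numbers → Spec_altaray numbers (altaray numbers)

-- ===== LEMMAS AND PROOFS =====

-- the run-length recurrence both programs compute: rl k = rl (k+1) + 1 when the signs alternate, else 1
def rl (numbers : List Int) (k : Nat) : Int :=
  if h : k + 1 < numbers.length ∧ numbers.getD k 0 * numbers.getD (k + 1) 0 < 0
  then rl numbers (k + 1) + 1 else 1
termination_by numbers.length - k
decreasing_by omega

-- A's answer array after the pass has reached position m (positions ≥ m final, positions < m still 1)
def tgt (numbers : List Int) (m : Nat) : List Int :=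
  (List.range numbers.length).map (fun k => if m ≤ k then rl numbers k else 1)

def tmpA (numbers : List Int) : List Bool :=
  (List.range (numbers.length - 1)).map
    (fun i => decide (numbers.getD i 0 * numbers.getD (i + 1) 0 < 0))

theorem find_ge (numbers : List Int) (n i : Nat) : i ≤ altarayFind numbers n i := by
  fun_induction altarayFind with
  | case1 j h ih => omega
  | case2 j h => omega

theorem find_lt (numbers : List Int) (n i : Nat) (h : i < n) : altarayFind numbers n i < n := by
  fun_induction altarayFind with
  | case1 j hc ih => exact ih (by omega)
  | case2 j hc => omega

theorem rl_run (numbers : List Int) (i : Nat) :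
    ∀ k, i ≤ k → k ≤ altarayFind numbers numbers.length i →
      rl numbers k = (altarayFind numbers numbers.length i : Int) - k + 1 := by
  fun_induction altarayFind with
  | case1 j h ih =>
      intro k hk1 hk2
      rcases Nat.eq_or_lt_of_le hk1 with rfl | hlt
      · have h1 : j + 1 ≤ altarayFind numbers numbers.length (j + 1) := find_ge _ _ _
        rw [rl, dif_pos h, ih (j+1) le_rfl (find_ge _ _ _)]
        push_cast; omega
      · exact ih k hlt hk2
  | case2 j h =>
      intro k hk1 hk2
      have hkj : k = j := by omega
      subst hkj
      rw [rl, dif_neg h]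
      omega

theorem outer_eq (numbers : List Int) :
    ∀ fuel i, i ≤ numbers.length → numbers.length - i ≤ fuel →
      altarayOuter numbers numbers.length i fuel
        = (List.range' i (numbers.length - i)).map (rl numbers) := by
  intro fuel
  induction fuel with
  | zero =>
      intro i h1 h2
      have : i = numbers.length := by omega
      subst this
      simp [altarayOuter]
  | succ fuel ih =>
      intro i h1 h2
      by_cases hi : i < numbers.length
      · set j := altarayFind numbers numbers.length i with hj
        have hij : i ≤ j := find_ge _ _ _
        have hjn : j < numbers.length := find_lt _ _ _ hi
        rw [altarayOuter]
        simp only [if_pos hi, ← hj]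
        rw [ih (j+1) (by omega) (by omega)]
        have hsplit : numbers.length - i = (j + 1 - i) + (numbers.length - (j+1)) := by omega
        rw [hsplit, ← List.range'_append_1, List.map_append]
        congr 1
        · rw [PySem.List.pyRange_one, List.map_map, List.range'_eq_map_range, List.map_map]
          have hT : ((j:Int)+1 - i).toNat = j + 1 - i := by omega
          rw [hT]
          apply List.map_congr_left
          intro t ht
          simp only [List.mem_range] at ht
          simp only [Function.comp_apply]
          rw [rl_run numbers i (i + t) (by omega) (by omega), ← hj]
          push_cast; ring
        · congr 2
          omega
      · have : i = numbers.length := by omega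
        subst this
        simp [altarayOuter]

theorem tgt_length (numbers : List Int) (m : Nat) : (tgt numbers m).length = numbers.length := by
  simp [tgt]

theorem rl_last (numbers : List Int) (p : Nat) (h : ¬ (p + 1 < numbers.length ∧ numbers.getD p 0 * numbers.getD (p + 1) 0 < 0)) :
    rl numbers p = 1 := by
  rw [rl, dif_neg h]

theorem tgt_getD (numbers : List Int) (p : Nat) (hp : p + 1 < numbers.length) :
    (tgt numbers (p + 1)).getD (p + 1) 0 = rl numbers (p + 1) := by
  rw [List.getD_eq_getElem _ _ (by simp [tgt]; omega)]
  simp [tgt]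

theorem tgt_set (numbers : List Int) (p : Nat) (hp : p + 1 < numbers.length)
    (hc : numbers.getD p 0 * numbers.getD (p + 1) 0 < 0) :
    (tgt numbers (p + 1)).set p ((tgt numbers (p + 1)).getD (p + 1) 0 + 1) = tgt numbers p := by
  rw [tgt_getD numbers p hp]
  apply List.ext_getElem
  · simp [tgt]
  · intro k hk1 hk2
    simp only [tgt, List.length_map, List.length_range] at hk2
    rw [List.getElem_set]
    by_cases hkp : p = k
    · subst hkp
      simp only [tgt, List.getElem_map, List.getElem_range, if_pos (le_refl p)]
      have hrl : rl numbers p = rl numbers (p + 1) + 1 := by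
        rw [rl, dif_pos ⟨hp, hc⟩]
      rw [hrl]
      simp
    · simp only [if_neg hkp, tgt, List.getElem_map, List.getElem_range]
      have h3 : (p + 1 ≤ k) ↔ (p ≤ k) := by omega
      simp only [h3]

theorem tgt_stable (numbers : List Int) (p : Nat) (hp : p + 1 < numbers.length)
    (hc : ¬ numbers.getD p 0 * numbers.getD (p + 1) 0 < 0) :
    tgt numbers (p + 1) = tgt numbers p := by
  apply List.ext_getElem
  · simp [tgt]
  · intro k hk1 hk2
    simp only [tgt, List.getElem_map, List.getElem_range]
    by_cases hkp : k = p
    · subst hkp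
      rw [if_neg (by omega), if_pos (le_refl k), rl_last numbers k (by tauto)]
    · have h3 : (p + 1 ≤ k) ↔ (p ≤ k) := by omega
      simp only [h3]

theorem loop2_inv (numbers : List Int) (p : Nat) (hp : p ≤ numbers.length - 1) :
    altarayLoop2 (tgt numbers p) (((tmpA numbers).take p).reverse) (numbers.length - p + 1)
      = tgt numbers 0 := by
  induction p with
  | zero => simp [altarayLoop2]
  | succ p ih =>
      have hlen : (tmpA numbers).length = numbers.length - 1 := by simp [tmpA]
      have hpn : p + 1 < numbers.length := by omega
      have htake : (tmpA numbers).take (p + 1)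
          = (tmpA numbers).take p ++ [decide (numbers.getD p 0 * numbers.getD (p + 1) 0 < 0)] := by
        rw [List.take_add_one]
        congr 1
        rw [List.getElem?_eq_getElem (by omega)]
        simp [tmpA, List.getElem_map, List.getElem_range]
      rw [htake, List.reverse_append]
      simp only [List.reverse_singleton, List.singleton_append]
      rw [altarayLoop2]
      simp only [tgt_length]
      have hidx : numbers.length - (numbers.length - (p + 1) + 1) = p := by omega
      rw [hidx]
      have hstep : (if decide (numbers.getD p 0 * numbers.getD (p + 1) 0 < 0) = true
          then (tgt numbers (p + 1)).set p ((tgt numbers (p + 1)).getD (p + 1) 0 + 1)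
          else tgt numbers (p + 1)) = tgt numbers p := by
        by_cases hc : numbers.getD p 0 * numbers.getD (p + 1) 0 < 0
        · rw [if_pos (by simpa using hc)]
          exact tgt_set numbers p hpn hc
        · rw [if_neg (by simpa using hc)]
          exact tgt_stable numbers p hpn hc
      rw [hstep]
      have hi : numbers.length - (p + 1) + 1 + 1 = numbers.length - p + 1 := by omega
      rw [hi]
      exact ih (by omega)

theorem altaray_eq_map_rl (numbers : List Int) :
    altaray numbers = (List.range numbers.length).map (rl numbers) := by
  have h0 : altaray numbers
      = altarayLoop2 (List.replicate numbers.length 1) (tmpA numbers).reverse 2 := rfl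
  rw [h0]
  rcases Nat.eq_zero_or_pos numbers.length with hn | hn
  · have ht : tmpA numbers = [] := by simp [tmpA, hn]
    rw [ht]
    simp [altarayLoop2, hn]
  · have hrep : List.replicate numbers.length (1:Int) = tgt numbers (numbers.length - 1) := by
      apply List.ext_getElem
      · simp [tgt]
      · intro k hk1 hk2
        simp only [List.getElem_replicate, tgt, List.getElem_map, List.getElem_range]
        by_cases h : numbers.length - 1 ≤ k
        · have hk : k < numbers.length := by simpa using hk1
          have hke : k = numbers.length - 1 := by omega
          rw [if_pos h, rl_last numbers k (by omega)]
        · rw [if_neg h]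
    have htk : (tmpA numbers).take (numbers.length - 1) = tmpA numbers := by
      apply List.take_of_length_le
      simp [tmpA]
    have hi2 : numbers.length - (numbers.length - 1) + 1 = 2 := by omega
    rw [hrep, ← hi2, ← htk, loop2_inv numbers (numbers.length - 1) le_rfl]
    simp [tgt]

theorem alt_eq_map_rl (numbers : List Int) :
    altaray_alt numbers = (List.range numbers.length).map (rl numbers) := by
  have h := outer_eq numbers numbers.length 0 (Nat.zero_le _) (by omega)
  simp only [Nat.sub_zero] at h
  rw [altaray_alt, h, List.range_eq_range']

-- ===== VERDICT (by name: the statement is the Claim_ definition above) =====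
theorem altaray_spec : Claim_equal_altaray := by
  intro numbers _
  unfold Spec_altaray
  rw [altaray_eq_map_rl, alt_eq_map_rl]
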